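-- pv_equiv track=rewrite | github.com/Apjo/algorithms_and_datastructures | src/dsa/problemsolving/python/dp/paint_fence.py | solve
-- ===== SOURCE A (Python) =====
-- def solve(n:int, k: int):
--     if n == 0:
--         return 0
--     same = [0 for i in range(n)]
--     different = [0 for i in range(n)]
--     total = [0 for i in range(n)]
--     same[0]=0 #since we have a single post no previous post to color with same color.
--     different[0]=k
--     total[0] = k
--     for i in range(1, n):
--         #same is restrictive, in order to use the same color, that means the last post of my neighbor has to be different than its previous post, since we can't have our neigbors with same 2 colors, and me too using the same color hence we need to have preceeding neighbors to have different color
--         same[i]= different[i - 1]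
--         different[i] = total[i - 1] * (k - 1) #to make the last post different from the previous color we take all the fences my neighbor painted and just pick a color that is different from last post
--         total[i] = same[i] + different[i]
--     return total[n - 1]
-- ===== SOURCE B (Python) =====
-- def solve(n: int, k: int):
--     # total_i satisfies t_0 = k, t_1 = k*k, t_i = (k-1)*(t_{i-1} + t_{i-2});
--     # compute t_{n-1} by binary matrix exponentiation of [[k-1, k-1], [1, 0]].
--     if n <= 0:
--         return 0
--     if n == 1:
--         return k
--
--     def mul(X, Y):
--         a, b, c, d = X
--         e, f, g, h = Y
--         return (a * e + b * g, a * f + b * h, c * e + d * g, c * f + d * h)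
--
--     def matpow(M, e):
--         if e == 0:
--             return (1, 0, 0, 1)
--         H = matpow(M, e // 2)
--         H2 = mul(H, H)
--         return mul(H2, M) if e % 2 == 1 else H2
--
--     a, b, _, _ = matpow((k - 1, k - 1, 1, 0), n - 2)
--     return a * (k * k) + b * k
-- ===== Notes on version B (the rewrite author's own statement) =====
-- stated objective: faster
-- what changed: Replaced the three O(n) DP arrays with binary matrix exponentiation of the 2x2 companion matrix of the order-2 recurrence t_i=(k-1)(t_{i-1}+t_{i-2}), so only O(log n) big-integer multiplications are performed.
import Mathlib
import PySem

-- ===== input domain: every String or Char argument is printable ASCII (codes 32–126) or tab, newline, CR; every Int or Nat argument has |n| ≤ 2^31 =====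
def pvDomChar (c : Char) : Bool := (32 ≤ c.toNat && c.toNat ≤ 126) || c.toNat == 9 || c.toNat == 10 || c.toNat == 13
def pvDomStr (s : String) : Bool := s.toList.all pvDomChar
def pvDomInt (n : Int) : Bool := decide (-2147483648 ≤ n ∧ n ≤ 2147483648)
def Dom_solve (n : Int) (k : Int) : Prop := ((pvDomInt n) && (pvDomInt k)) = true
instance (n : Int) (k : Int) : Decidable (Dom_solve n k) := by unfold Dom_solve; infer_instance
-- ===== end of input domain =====

-- B replaces A's three O(n) DP arrays by binary exponentiation of the 2x2 companion
-- matrix of the order-2 recurrence, for O(log n) multiplications instead of O(n).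
-- (Equivalence is about the return value; neither program mutates its arguments.)

-- ===== PORT A =====
-- the loop body: same[i] = different[i-1]; different[i] = total[i-1]*(k-1); total[i] = same[i] + different[i]
-- (index reads are rendered with getD 0; for every input in Pre_solve all indices are in range, so this is exact)
def solveStep (k : Int) (st : List Int × List Int × List Int) (i : Int) :
    List Int × List Int × List Int :=
  let s := st.1.set i.toNat (st.2.1.getD (i-1).toNat 0)
  let d := st.2.1.set i.toNat ((st.2.2.getD (i-1).toNat 0) * (k-1))
  let t := st.2.2.set i.toNat ((s.getD i.toNat 0) + (d.getD i.toNat 0))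
  (s, d, t)

def solve (n : Int) (k : Int) : Int :=
  if n = 0 then 0 else
  -- zeros = [0 for i in range(n)]; same[0]=0; different[0]=k; total[0]=k; loop over range(1, n); return total[n-1]
  (((PySem.List.pyRange 1 n 1).foldl (solveStep k)
      (((PySem.List.pyRange 0 n 1).map (fun _ => (0:Int))).set 0 0,
       ((PySem.List.pyRange 0 n 1).map (fun _ => (0:Int))).set 0 k,
       ((PySem.List.pyRange 0 n 1).map (fun _ => (0:Int))).set 0 k)).2.2).getD (n-1).toNat 0

-- ===== PORT B =====
structure Mat2 where
  a : Int
  b : Int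
  c : Int
  d : Int
deriving DecidableEq, Repr

def pvMul (X Y : Mat2) : Mat2 :=
  ⟨X.a*Y.a + X.b*Y.c, X.a*Y.b + X.b*Y.d, X.c*Y.a + X.d*Y.c, X.c*Y.b + X.d*Y.d⟩

def pvMatpow (M : Mat2) (e : Nat) : Mat2 :=
  if h : e = 0 then ⟨1, 0, 0, 1⟩ else
    let H := pvMatpow M (e / 2)
    let H2 := pvMul H H
    if e % 2 = 1 then pvMul H2 M else H2
termination_by e
decreasing_by exact Nat.div_lt_self (Nat.pos_of_ne_zero h) (by norm_num)

def solve_alt (n : Int) (k : Int) : Int :=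
  if n ≤ 0 then 0
  else if n = 1 then k
  else
    let P := pvMatpow ⟨k-1, k-1, 1, 0⟩ (n-2).toNat
    P.a * (k * k) + P.b * k

-- ===== PRECONDITION & SPEC =====
-- Pre_ excludes n < 0, on which A raises IndexError (same[0] = 0 on an empty list).
def Pre_solve (n : Int) (k : Int) : Prop := 0 ≤ n
instance (n : Int) (k : Int) : Decidable (Pre_solve n k) := by unfold Pre_solve; infer_instance
def pvWitness_solve : Int × Int := (3, 2)

def Spec_solve (n : Int) (k : Int) (out : Int) : Prop := out = solve_alt n k
instance (n : Int) (k : Int) (out : Int) : Decidable (Spec_solve n k out) := by unfold Spec_solve; infer_instance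

-- ===== CLAIM (what is proved, stated in full; the proofs are below) =====
def Claim_equal_solve : Prop := ∀ (n : Int) (k : Int), Dom_solve n k → Pre_solve n k → Spec_solve n k (solve n k)

-- ===== LEMMAS AND PROOFS =====

-- the common reference sequence: total_j of the fence recurrence
def tval (k : Int) : Nat → Int
  | 0 => k
  | 1 => k * k
  | (j+2) => (k-1) * (tval k (j+1) + tval k j)

-- different_j
def dval (k : Int) (j : Nat) : Int := if j = 0 then k else tval k (j-1) * (k-1)

theorem dval_add (k : Int) (m : Nat) : dval k m + dval k (m+1) = tval k (m+1) := by
  cases m with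
  | zero => simp [dval, tval]; ring
  | succ m => simp [dval, tval]; ring

-- ----- B side: matpow = iterated left multiplication, and its action on (tval) -----
def pw (M : Mat2) : Nat → Mat2
  | 0 => ⟨1, 0, 0, 1⟩
  | (e+1) => pvMul M (pw M e)

theorem pvMul_assoc (X Y Z : Mat2) : pvMul (pvMul X Y) Z = pvMul X (pvMul Y Z) := by
  simp only [pvMul, Mat2.mk.injEq]
  refine ⟨by ring, by ring, by ring, by ring⟩

theorem pvMul_id_left (X : Mat2) : pvMul ⟨1,0,0,1⟩ X = X := by
  simp [pvMul]

theorem pvMul_id_right (X : Mat2) : pvMul X ⟨1,0,0,1⟩ = X := by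
  simp [pvMul]

theorem pw_add (M : Mat2) (a b : Nat) : pw M (a + b) = pvMul (pw M a) (pw M b) := by
  induction a with
  | zero => simp [pw, pvMul_id_left]
  | succ a ih =>
      have : a + 1 + b = (a + b) + 1 := by omega
      rw [this]
      simp only [pw, ih, pvMul_assoc]

theorem pvMatpow_eq_pw (M : Mat2) : ∀ e, pvMatpow M e = pw M e := by
  intro e
  induction e using Nat.strong_induction_on with
  | _ e ih =>
    rw [pvMatpow]
    by_cases h : e = 0
    · simp [h, pw]
    · simp only [h, dif_neg, not_false_iff]
      have ih2 := ih (e / 2) (Nat.div_lt_self (Nat.pos_of_ne_zero h) (by norm_num))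
      have key1 : pvMul (pvMul (pw M (e/2)) (pw M (e/2))) M = pw M (e/2 + e/2 + 1) := by
        rw [pw_add M (e/2 + e/2) 1, pw_add M (e/2) (e/2)]
        have h1 : pw M 1 = M := by simp [pw, pvMul_id_right]
        rw [h1]
      have key2 : pvMul (pw M (e/2)) (pw M (e/2)) = pw M (e/2 + e/2) := (pw_add M (e/2) (e/2)).symm
      by_cases hp : e % 2 = 1
      · have he : e = e / 2 + e / 2 + 1 := by omega
        simp only [hp, if_pos, ih2]
        rw [key1, ← he]
      · have he : e = e / 2 + e / 2 := by omega
        simp only [hp, if_neg, not_false_iff, ih2]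
        rw [key2, ← he]

-- the companion matrix sends (tval (m+1), tval m) along the recurrence
theorem pw_tval (k : Int) (m : Nat) :
    (pw ⟨k-1, k-1, 1, 0⟩ m).a * (k*k) + (pw ⟨k-1, k-1, 1, 0⟩ m).b * k = tval k (m+1) ∧
    (pw ⟨k-1, k-1, 1, 0⟩ m).c * (k*k) + (pw ⟨k-1, k-1, 1, 0⟩ m).d * k = tval k m := by
  induction m with
  | zero => constructor <;> simp [pw, tval]
  | succ m ih =>
      obtain ⟨h1, h2⟩ := ih
      constructor
      · show (pvMul _ _).a * (k*k) + (pvMul _ _).b * k = tval k (m+2)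
        simp only [pvMul, tval]
        rw [← h1, ← h2]; ring
      · show (pvMul _ _).c * (k*k) + (pvMul _ _).d * k = tval k (m+1)
        simp only [pvMul]
        rw [← h1]; ring

theorem solve_alt_eq_tval (n k : Int) (hn : 1 ≤ n) :
    solve_alt n k = tval k (n.toNat - 1) := by
  unfold solve_alt
  rw [if_neg (by omega)]
  by_cases h1 : n = 1
  · simp [h1, tval]
  · rw [if_neg h1]
    have := (pw_tval k (n-2).toNat).1
    rw [pvMatpow_eq_pw, this]
    congr 1
    omega

-- ----- A side: the fold invariant -----
def FenceInv (N : Nat) (k : Int) (m : Nat) (st : List Int × List Int × List Int) : Prop :=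
  st.1.length = N ∧ st.2.1.length = N ∧ st.2.2.length = N ∧
  (∀ j, j < m → st.2.1[j]? = some (dval k j)) ∧
  (∀ j, j < m → st.2.2[j]? = some (tval k j))

theorem solveStep_inv (N : Nat) (k : Int) (m : Nat) (st : List Int × List Int × List Int)
    (hm : 1 ≤ m) (hN : m < N) (h : FenceInv N k m st) :
    FenceInv N k (m+1) (solveStep k st (m : Int)) := by
  obtain ⟨hs, hd, ht, hdj, htj⟩ := h
  have hi : ((m : Int)).toNat = m := by omega
  have hi1 : ((m : Int) - 1).toNat = m - 1 := by omega
  have hdm1 : st.2.1.getD (m-1) 0 = dval k (m-1) := by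
    rw [List.getD_eq_getElem?_getD, hdj (m-1) (by omega)]; rfl
  have htm1 : st.2.2.getD (m-1) 0 = tval k (m-1) := by
    rw [List.getD_eq_getElem?_getD, htj (m-1) (by omega)]; rfl
  unfold solveStep
  simp only [hi, hi1, hdm1, htm1]
  have hsm : (st.1.set m (dval k (m-1))).getD m 0 = dval k (m-1) := by
    rw [List.getD_eq_getElem?_getD, List.getElem?_set_self (by omega)]; rfl
  have hdvm : tval k (m-1) * (k-1) = dval k m := by
    unfold dval; rw [if_neg (by omega)]
  have hdm : (st.2.1.set m (tval k (m-1) * (k-1))).getD m 0 = dval k m := by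
    rw [List.getD_eq_getElem?_getD, List.getElem?_set_self (by omega), hdvm]; rfl
  have hsum : dval k (m-1) + dval k m = tval k m := by
    have := dval_add k (m-1)
    have hm1 : m - 1 + 1 = m := by omega
    rw [hm1] at this; exact this
  refine ⟨by simpa using hs, by simpa using hd, by simpa using ht, ?_, ?_⟩
  · intro j hj
    simp only
    by_cases hjm : j = m
    · subst hjm
      rw [List.getElem?_set_self (by omega), hdvm]
    · rw [List.getElem?_set_ne (by omega)]
      exact hdj j (by omega)
  · intro j hj
    simp only [hsm, hdm, hsum]
    by_cases hjm : j = m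
    · subst hjm
      rw [List.getElem?_set_self (by omega)]
    · rw [List.getElem?_set_ne (by omega)]
      exact htj j (by omega)

theorem fold_inv (N : Nat) (k : Int) (init : List Int × List Int × List Int)
    (h1 : FenceInv N k 1 init) :
    ∀ m : Nat, 1 ≤ m → m ≤ N →
      FenceInv N k m ((PySem.List.pyRange 1 (m : Int) 1).foldl (solveStep k) init) := by
  intro m
  induction m with
  | zero => omega
  | succ m ih =>
      intro _ hmN
      have hc : ((m + 1 : Nat) : Int) = (m : Int) + 1 := by push_cast; ring
      rw [hc]
      by_cases hm : m = 0
      · subst hm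
        rw [show ((0:Nat):Int) + 1 = (1:Int) by norm_num,
          PySem.List.pyRange_one_eq_nil (le_refl (1:Int))]
        simpa using h1
      · rw [PySem.List.pyRange_one_succ_right (show (1:Int) ≤ (m:Int) by omega), List.foldl_append]
        simp only [List.foldl_cons, List.foldl_nil]
        exact solveStep_inv N k m _ (by omega) (by omega) (ih (by omega) (by omega))

theorem solve_eq_tval (n k : Int) (hn : 1 ≤ n) :
    solve n k = tval k (n.toNat - 1) := by
  unfold solve
  rw [if_neg (by omega)]
  set N := n.toNat with hN
  have hzlen : ((PySem.List.pyRange 0 n 1).map (fun _ => (0:Int))).length = N := by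
    simp [PySem.List.length_pyRange_one, hN]
  have h1 : FenceInv N k 1 (((PySem.List.pyRange 0 n 1).map (fun _ => (0:Int))).set 0 0,
      ((PySem.List.pyRange 0 n 1).map (fun _ => (0:Int))).set 0 k,
      ((PySem.List.pyRange 0 n 1).map (fun _ => (0:Int))).set 0 k) := by
    refine ⟨by simpa using hzlen, by simpa using hzlen, by simpa using hzlen, ?_, ?_⟩
    · intro j hj
      have hj0 : j = 0 := by omega
      subst hj0
      simp only
      rw [List.getElem?_set_self (by omega)]
      simp [dval]
    · intro j hj
      have hj0 : j = 0 := by omega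
      subst hj0
      simp only
      rw [List.getElem?_set_self (by omega)]
      simp [tval]
  have hnN : n = (N : Int) := by omega
  have hinv := fold_inv N k _ h1 N (by omega) (le_refl N)
  rw [← hnN] at hinv
  obtain ⟨_, _, _, _, htj⟩ := hinv
  have hidx : (n - 1).toNat = N - 1 := by omega
  rw [hidx, List.getD_eq_getElem?_getD, htj (N-1) (by omega)]
  rfl

-- ===== VERDICT (by name: the statement is the Claim_ definition above) =====
theorem solve_spec : Claim_equal_solve := by
  intro n k _ hpre
  unfold Spec_solve
  by_cases hn : n = 0
  · subst hn
    simp [solve, solve_alt]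
  · have h1 : 1 ≤ n := by unfold Pre_solve at hpre; omega
    rw [solve_eq_tval n k h1, solve_alt_eq_tval n k h1]
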